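-- pv_equiv track=rewrite | github.com/giacomomiceli/private_genai | rag_proof_of_concept/readers.py | _count_headers
-- ===== SOURCE A (Python) =====
-- from collections import defaultdict, Counter
--
-- def _count_headers(header_candidates):
--     # Initialize a dictionary to store headers for each source
--     headers_dict = defaultdict(list)
--
--     # Initialize a dictionary to count occurrences of each header for each source
--     header_count = defaultdict(Counter)
--
--     # Count occurrences of each header for each source
--     for header, source in header_candidates:
--         if header:  # Ignore empty headers
--             header_count[source][header] += 1
--
--     # Filter headers that repeat at least once
--     for source, counter in header_count.items():
--         for header, count in counter.items():
--             if count > 1: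
--                 headers_dict[source].append(header)
--
--     return headers_dict
-- ===== SOURCE B (Python) =====
-- from collections import defaultdict
--
-- def _count_headers(header_candidates):
--     # Sources in order of their first truthy-header appearance
--     sources = list(dict.fromkeys(source for header, source in header_candidates if header))
--
--     result = defaultdict(list)
--     for source in sources:
--         # This source's truthy headers, in order
--         hs = [header for header, s in header_candidates if header and s == source]
--         # Keep each first occurrence that recurs later on
--         repeats = [h for i, h in enumerate(hs) if h not in hs[:i] and h in hs[i + 1:]]
--         if repeats:
--             result[source] = repeats
--     return result
-- ===== Notes on version B (the rewrite author's own statement) =====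
-- stated objective: alternative
-- what changed: Replaces the nested defaultdict(Counter) counting with a count-free strategy: dedup the sources in first-appearance order, and per source pick each header position that is a first occurrence recurring later (prefix-absence + suffix-membership scans instead of any counter).
import Mathlib
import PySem

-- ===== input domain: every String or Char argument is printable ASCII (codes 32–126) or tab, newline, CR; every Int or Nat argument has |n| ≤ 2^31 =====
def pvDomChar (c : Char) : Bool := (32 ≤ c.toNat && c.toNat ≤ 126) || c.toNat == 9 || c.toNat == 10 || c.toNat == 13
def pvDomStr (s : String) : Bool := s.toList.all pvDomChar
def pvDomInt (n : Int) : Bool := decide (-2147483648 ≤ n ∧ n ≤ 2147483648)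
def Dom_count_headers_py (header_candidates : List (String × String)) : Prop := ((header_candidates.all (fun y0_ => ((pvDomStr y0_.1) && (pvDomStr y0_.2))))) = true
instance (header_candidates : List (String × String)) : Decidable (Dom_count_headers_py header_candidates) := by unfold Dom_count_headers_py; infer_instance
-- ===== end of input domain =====

-- B drops the counting entirely: it dedups the sources in first-appearance order and, per source,
-- keeps each header position that is a first occurrence recurring later (prefix/suffix scans);
-- objective: alternative algorithm, trading A's linear counting for count-free quadratic scans.

-- ===== PORT A =====
def count_headers_py (header_candidates : List (String × String)) : List (String × List String) :=
  -- header_count[source][header] += 1 for each truthy header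
  let header_count : PySem.Dict String (PySem.Dict String Int) :=
    header_candidates.foldl (fun hc p =>
      if p.1 ≠ "" then
        hc.modify p.2 PySem.Dict.empty (fun c => c.modify p.1 0 (· + 1))
      else hc) PySem.Dict.empty
  -- headers_dict[source].append(header) whenever count > 1
  let headers_dict : PySem.Dict String (List String) :=
    header_count.items.foldl (fun hd sc =>
      sc.2.items.foldl (fun hd hc =>
        if hc.2 > 1 then hd.modify sc.1 [] (· ++ [hc.1]) else hd) hd) PySem.Dict.empty
  headers_dict.items

-- ===== PORT B =====
def count_headers_py_alt (header_candidates : List (String × String)) : List (String × List String) :=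
  -- sources = list(dict.fromkeys(source for header, source in header_candidates if header))
  let sources : List String :=
    PySem.List.dedup ((header_candidates.filter (fun p => p.1 ≠ "")).map (·.2))
  let result : PySem.Dict String (List String) :=
    sources.foldl (fun r source =>
      -- hs = [header for header, s in header_candidates if header and s == source]
      let hs : List String :=
        (header_candidates.filter (fun p => p.1 ≠ "" ∧ p.2 = source)).map (·.1)
      -- repeats = [h for i, h in enumerate(hs) if h not in hs[:i] and h in hs[i+1:]]
      let repeats : List String :=
        ((PySem.List.enumerate hs).filter (fun q =>
          !((PySem.List.slice hs none (some q.1)).contains q.2)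
          && (PySem.List.slice hs (some (q.1 + 1)) none).contains q.2)).map (·.2)
      if repeats ≠ [] then r.insert source repeats else r) PySem.Dict.empty
  result.items

-- ===== PRECONDITION & SPEC =====
def Spec_count_headers_py (header_candidates : List (String × String)) (out : List (String × List String)) : Prop := out = count_headers_py_alt header_candidates
instance (header_candidates : List (String × String)) (out : List (String × List String)) : Decidable (Spec_count_headers_py header_candidates out) := by unfold Spec_count_headers_py; infer_instance

-- ===== CLAIM (what is proved, stated in full; the proofs are below) =====
def Claim_equal_count_headers_py : Prop := ∀ (header_candidates : List (String × String)), Dom_count_headers_py header_candidates → Spec_count_headers_py header_candidates (count_headers_py header_candidates)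

-- ===== LEMMAS AND PROOFS =====

-- intermediate form: truthy headers grouped by source, then each group's repeated headers
def pvGrouped (l : List (String × String)) : List (String × List String) :=
  let by_source : PySem.Dict String (List String) :=
    l.foldl (fun d p => if p.1 ≠ "" then d.modify p.2 [] (· ++ [p.1]) else d) PySem.Dict.empty
  let result : PySem.Dict String (List String) :=
    by_source.items.foldl (fun r sb =>
      let repeats := ((PySem.Dict.counter sb.2).items.filter (fun hc => hc.2 > 1)).map (·.1)
      if repeats ≠ [] then r.insert sb.1 repeats else r) PySem.Dict.empty
  result.items

-- map a per-source header list to its Counter, keys untouched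
def pvMapCnt (bs : PySem.Dict String (List String)) : PySem.Dict String (PySem.Dict String Int) :=
  PySem.Dict.mk (bs.items.map (fun p => (p.1, PySem.Dict.counter p.2)))

theorem pv_foldl_ite {α β : Type} (P : α → Prop) [DecidablePred P] (f : β → α → β) :
    ∀ (l : List α) (a : β),
      l.foldl (fun a x => if P x then f a x else a) a
        = (l.filter (fun x => decide (P x))).foldl f a := by
  intro l
  induction l with
  | nil => intro a; rfl
  | cons x t ih =>
    intro a
    by_cases h : P x <;> simp [List.foldl_cons, h, ih]

theorem pv_get?_mapCnt (bs : PySem.Dict String (List String)) (s : String) :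
    (pvMapCnt bs).get? s = (bs.get? s).map PySem.Dict.counter := by
  obtain ⟨l⟩ := bs
  induction l with
  | nil => rfl
  | cons p t ih =>
    simp only [pvMapCnt, PySem.Dict.get?, List.map_cons, List.find?] at *
    by_cases h : p.1 == s <;> simp [h] at * <;> simpa using ih

theorem pv_contains_mapCnt (bs : PySem.Dict String (List String)) (s : String) :
    (pvMapCnt bs).contains s = bs.contains s := by
  simp [PySem.Dict.contains, pvMapCnt, List.any_map, Function.comp_def]

theorem pv_insert_mapCnt (bs : PySem.Dict String (List String)) (s : String) (v : List String) :
    pvMapCnt (bs.insert s v) = (pvMapCnt bs).insert s (PySem.Dict.counter v) := by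
  by_cases h : bs.contains s = true
  · simp only [PySem.Dict.insert, pv_contains_mapCnt, h, if_pos]
    simp only [pvMapCnt, List.map_map]
    congr 1
    apply List.map_congr_left
    intro p _
    by_cases hp : p.1 = s <;> simp [hp]
  · simp only [PySem.Dict.insert, pv_contains_mapCnt, h, if_neg, Bool.false_eq_true,
      not_false_iff]
    simp [pvMapCnt]

theorem pv_counter_snoc (v : List String) (h : String) :
    PySem.Dict.counter (v ++ [h]) = (PySem.Dict.counter v).modify h 0 (· + 1) := by
  simp [PySem.Dict.counter, List.foldl_append]

theorem pv_modify_mapCnt (bs : PySem.Dict String (List String)) (s h : String) :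
    pvMapCnt (bs.modify s [] (· ++ [h]))
      = (pvMapCnt bs).modify s PySem.Dict.empty (fun c => c.modify h 0 (· + 1)) := by
  simp only [PySem.Dict.modify, pv_insert_mapCnt, PySem.Dict.getD, pv_get?_mapCnt]
  cases hg : bs.get? s with
  | none => simp; rfl
  | some v => simp [pv_counter_snoc, PySem.Dict.modify, PySem.Dict.getD]

theorem pv_phase1 (l : List (String × String)) :
    ∀ bs : PySem.Dict String (List String),
      l.foldl (fun hc p => hc.modify p.2 PySem.Dict.empty (fun c => c.modify p.1 0 (· + 1)))
        (pvMapCnt bs)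
        = pvMapCnt (l.foldl (fun d p => d.modify p.2 [] (· ++ [p.1])) bs) := by
  induction l with
  | nil => intro bs; rfl
  | cons p t ih =>
    intro bs
    simp only [List.foldl_cons, ← pv_modify_mapCnt, ih]

theorem pv_insert_insert {κ ν : Type} [BEq κ] [LawfulBEq κ] (d : PySem.Dict κ ν) (k : κ) (v w : ν) :
    (d.insert k v).insert k w = d.insert k w := PySem.Dict.insert_insert_self d k v w

theorem pv_modify_modify {κ ν : Type} [BEq κ] [LawfulBEq κ] (d : PySem.Dict κ ν) (k : κ)
    (d0 d0' : ν) (f g : ν → ν) :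
    (d.modify k d0 f).modify k d0' g = d.modify k d0 (fun v => g (f v)) := by
  simp only [PySem.Dict.modify, PySem.Dict.getD_insert_self, pv_insert_insert]

theorem pv_innerA (s : String) (cl : List (String × Int)) :
    ∀ acc : PySem.Dict String (List String),
      cl.foldl (fun hd hc => if hc.2 > 1 then hd.modify s [] (· ++ [hc.1]) else hd) acc
        = (if (cl.filter (fun hc => hc.2 > 1)).map (·.1) = ([] : List String) then acc
           else acc.modify s [] (· ++ (cl.filter (fun hc => hc.2 > 1)).map (·.1))) := by
  induction cl with
  | nil => intro acc; rfl
  | cons hc t ih =>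
    intro acc
    by_cases h : hc.2 > 1
    · simp only [List.foldl_cons, h, if_pos, List.filter_cons, decide_eq_true_eq, List.map_cons, ih]
      by_cases ht : (t.filter (fun hc => hc.2 > 1)).map (·.1) = ([] : List String)
      · simp [ht]
      · simp only [ht, if_neg, reduceCtorEq, not_false_iff, pv_modify_modify]
        congr 1
        funext v
        simp [List.append_assoc]
    · simp only [List.foldl_cons, h, if_neg, not_false_iff, List.filter_cons, decide_eq_true_eq, ih]

theorem pv_phase2 (l : List (String × List String)) :
    ∀ acc : PySem.Dict String (List String),
      (l.map (·.1)).Nodup →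
      (∀ p ∈ l, acc.contains p.1 = false) →
      (l.map (fun p => (p.1, PySem.Dict.counter p.2))).foldl
          (fun hd sc => sc.2.items.foldl
            (fun hd hc => if hc.2 > 1 then hd.modify sc.1 [] (· ++ [hc.1]) else hd) hd) acc
        = l.foldl (fun r sb =>
            let repeats := ((PySem.Dict.counter sb.2).items.filter (fun hc => hc.2 > 1)).map (·.1)
            if repeats ≠ [] then r.insert sb.1 repeats else r) acc := by
  induction l with
  | nil => intro acc _ _; rfl
  | cons p t ih =>
    intro acc hnd hc
    have hcp : acc.contains p.1 = false := hc p (List.mem_cons_self ..)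
    have hnd' : (t.map (·.1)).Nodup := by
      simp only [List.map_cons, List.nodup_cons] at hnd
      exact hnd.2
    simp only [List.map_cons, List.foldl_cons]
    rw [pv_innerA]
    by_cases hr : ((PySem.Dict.counter p.2).items.filter (fun hc => hc.2 > 1)).map (·.1)
        = ([] : List String)
    · rw [if_pos hr, if_neg (by simpa using hr)]
      exact ih acc hnd' (fun q hq => hc q (List.mem_cons_of_mem _ hq))
    · have hmod : acc.modify p.1 []
          (· ++ ((PySem.Dict.counter p.2).items.filter (fun hc => hc.2 > 1)).map (·.1))
          = acc.insert p.1 (((PySem.Dict.counter p.2).items.filter (fun hc => hc.2 > 1)).map (·.1)) := by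
        simp [PySem.Dict.modify, PySem.Dict.getD_of_not_contains acc ([] : List String) hcp]
      rw [if_neg hr, if_pos hr, hmod]
      apply ih
      · exact hnd'
      · intro q hq
        rw [PySem.Dict.contains_insert]
        have hqp : q.1 ≠ p.1 := by
          simp only [List.map_cons, List.nodup_cons, List.mem_map] at hnd
          intro he
          exact hnd.1 ⟨q, hq, he⟩
        simp [hqp, hc q (List.mem_cons_of_mem _ hq)]

theorem pv_A_eq_grouped (l : List (String × String)) : count_headers_py l = pvGrouped l := by
  simp only [count_headers_py, pvGrouped]
  have e1 : l.foldl (fun hc p => if p.1 ≠ "" then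
        hc.modify p.2 PySem.Dict.empty (fun c => c.modify p.1 0 (· + 1)) else hc)
        (PySem.Dict.empty : PySem.Dict String (PySem.Dict String Int))
      = (l.filter (fun p => decide (p.1 ≠ ""))).foldl
          (fun hc p => hc.modify p.2 PySem.Dict.empty (fun c => c.modify p.1 0 (· + 1)))
          PySem.Dict.empty :=
    pv_foldl_ite _ _ l _
  have e2 : l.foldl (fun d p => if p.1 ≠ "" then d.modify p.2 [] (· ++ [p.1]) else d)
        PySem.Dict.empty
      = (l.filter (fun p => decide (p.1 ≠ ""))).foldl
          (fun d p => d.modify p.2 [] (· ++ [p.1])) PySem.Dict.empty :=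
    pv_foldl_ite _ _ l _
  rw [e1, e2]
  have h0 : (PySem.Dict.empty : PySem.Dict String (PySem.Dict String Int))
      = pvMapCnt PySem.Dict.empty := rfl
  rw [h0, pv_phase1]
  set bs := (l.filter (fun p => decide (p.1 ≠ ""))).foldl
      (fun d p => d.modify p.2 [] (· ++ [p.1])) PySem.Dict.empty with hbs
  have hitems : (pvMapCnt bs).items = bs.items.map (fun p => (p.1, PySem.Dict.counter p.2)) := rfl
  rw [hitems]
  congr 1
  apply pv_phase2
  · exact PySem.Dict.nodup_keys_foldl_modify_key (κ := String) (ν := List String)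
      (l.filter (fun p => decide (p.1 ≠ ""))) (fun p => p.2) []
      (fun d p v => v ++ [p.1]) PySem.Dict.empty PySem.Dict.nodup_keys_empty
  · intro p _; rfl


-- the count-free comprehension lists exactly the first occurrences with count > 1
theorem pv_rep (t : List String) : ∀ pre : List String,
    ((PySem.List.enumerate t (pre.length : Int)).filter (fun q =>
        !((PySem.List.slice (pre ++ t) none (some q.1)).contains q.2)
        && (PySem.List.slice (pre ++ t) (some (q.1 + 1)) none).contains q.2)).map (·.2)
      = (PySem.Set.ofList t).filter (fun h => !pre.contains h && decide (1 < t.count h)) := by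
  induction t with
  | nil => intro pre; simp [PySem.List.enumerate, PySem.Set.ofList]
  | cons x t ih =>
    intro pre
    have h1 : PySem.List.slice (pre ++ x :: t) none (some (pre.length : Int)) = pre := by
      rw [PySem.List.slice_to_natCast]; exact List.take_left
    have h2 : PySem.List.slice (pre ++ x :: t) (some ((pre.length : Int) + 1)) none = t := by
      rw [show ((pre.length : Int) + 1) = ((pre.length + 1 : Nat) : Int) by push_cast; ring,
          PySem.List.slice_from_natCast,
          show pre ++ x :: t = (pre ++ [x]) ++ t by simp,
          show pre.length + 1 = (pre ++ [x]).length by simp]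
      exact List.drop_left
    have h5 : (t.contains x) = decide (1 < (x :: t).count x) := by
      rw [List.count_cons_self]
      by_cases hx : x ∈ t
      · simp [hx]
      · simp [hx, List.count_eq_zero_of_not_mem hx]
    have htail : ((PySem.List.enumerate t ((pre.length : Int) + 1)).filter (fun q =>
          !((PySem.List.slice (pre ++ x :: t) none (some q.1)).contains q.2)
          && (PySem.List.slice (pre ++ x :: t) (some (q.1 + 1)) none).contains q.2)).map (·.2)
        = (PySem.Set.ofList t).filter (fun h => !(pre ++ [x]).contains h && decide (1 < t.count h)) := by
      rw [show ((pre.length : Int) + 1) = (((pre ++ [x]).length : Nat) : Int) by simp,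
          show pre ++ x :: t = (pre ++ [x]) ++ t by simp]
      exact ih (pre ++ [x])
    have h6 : ((PySem.Set.ofList t).discard x).filter
          (fun h => !pre.contains h && decide (1 < (x :: t).count h))
        = (PySem.Set.ofList t).filter (fun h => !(pre ++ [x]).contains h && decide (1 < t.count h)) := by
      unfold PySem.Set.discard
      rw [List.filter_filter]
      apply List.filter_congr
      intro h _
      by_cases hx : h = x
      · subst hx; simp
      · simp [hx, Ne.symm hx]
    rw [PySem.List.enumerate_cons, List.filter_cons, PySem.Set.ofList_cons, List.filter_cons]
    simp only [h1, h2]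
    rw [← h5]
    by_cases hcond : (!pre.contains x && t.contains x) = true
    · rw [if_pos hcond, if_pos hcond]
      simp only [List.map_cons]
      rw [htail, h6]
    · rw [if_neg hcond, if_neg hcond, htail, h6]


theorem pv_rep' (hs : List String) :
    ((PySem.List.enumerate hs).filter (fun q =>
        !((PySem.List.slice hs none (some q.1)).contains q.2)
        && (PySem.List.slice hs (some (q.1 + 1)) none).contains q.2)).map (·.2)
      = (PySem.Set.ofList hs).filter (fun h => decide (1 < hs.count h)) := by
  simpa using pv_rep hs []

theorem pv_repA (hs : List String) :
    ((PySem.Dict.counter hs).items.filter (fun hc => hc.2 > 1)).map (·.1)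
      = (PySem.Set.ofList hs).filter (fun h => decide (1 < hs.count h)) := by
  rw [PySem.Dict.items_counter, List.filter_map, List.map_map]
  simp [Function.comp_def]

theorem pv_grouped_eq_alt (l : List (String × String)) :
    pvGrouped l = count_headers_py_alt l := by
  simp only [pvGrouped, count_headers_py_alt]
  rw [pv_foldl_ite (fun p : String × String => p.1 ≠ "")
    (fun (d : PySem.Dict String (List String)) p => d.modify p.2 [] (· ++ [p.1])) l PySem.Dict.empty]
  set fl := l.filter (fun p => decide (p.1 ≠ "")) with hfl
  set bs := fl.foldl (fun d p => d.modify p.2 [] (· ++ [p.1])) PySem.Dict.empty with hbs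
  have hnd : bs.keys.Nodup :=
    PySem.Dict.nodup_keys_foldl_modify_key (κ := String) (ν := List String)
      fl (fun p => p.2) [] (fun d p v => v ++ [p.1]) PySem.Dict.empty PySem.Dict.nodup_keys_empty
  have hkeys : bs.keys = PySem.Set.ofList (fl.map (·.2)) := by
    rw [hbs, PySem.Dict.keys_foldl_modify_key (κ := String) (ν := List String)
      fl (fun p => p.2) [] (fun d p v => v ++ [p.1]) PySem.Dict.empty]
    simp [PySem.Dict.keys, PySem.Dict.empty, PySem.Set.update_nil_left]
  have hgetD : ∀ s, bs.getD s [] = (fl.filter (fun p => p.2 == s)).map (·.1) := by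
    intro s
    rw [hbs, show fl.foldl (fun d p => d.modify p.2 [] (· ++ [p.1])) PySem.Dict.empty
        = (fl.map (fun p => (p.2, p.1))).foldl (fun d q => d.modify q.1 [] (· ++ [q.2]))
            PySem.Dict.empty by rw [List.foldl_map],
      PySem.Dict.getD_foldl_modify_append]
    simp [List.filter_map, Function.comp_def, PySem.Dict.getD_empty]
  have hitems : bs.items = (PySem.Set.ofList (fl.map (·.2))).map
      (fun s => (s, (fl.filter (fun p => p.2 == s)).map (·.1))) := by
    rw [PySem.Dict.items_eq_map_keys bs hnd [], hkeys]
    exact List.map_congr_left (fun s _ => by rw [hgetD])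
  rw [hitems, List.foldl_map]
  have hsrc : PySem.List.dedup ((l.filter (fun p => p.1 ≠ "")).map (·.2))
      = PySem.Set.ofList (fl.map (·.2)) := rfl
  rw [hsrc]
  congr 1
  apply PySem.List.foldl_congr_mem
  intro acc s _
  have hhs : (fl.filter (fun p => p.2 == s)).map (·.1)
      = (l.filter (fun p => decide (p.1 ≠ "" ∧ p.2 = s))).map (·.1) := by
    rw [hfl, List.filter_filter]
    congr 1
    apply List.filter_congr
    intro p _
    by_cases h1 : p.1 = "" <;> by_cases h2 : p.2 = s <;> simp [h1, h2]
  simp only [hhs, pv_rep', pv_repA]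

-- ===== VERDICT (by name: the statement is the Claim_ definition above) =====
theorem count_headers_py_spec : Claim_equal_count_headers_py := by
  intro l _
  unfold Spec_count_headers_py
  rw [pv_A_eq_grouped, pv_grouped_eq_alt]
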